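-- pv_equiv track=rewrite | github.com/tjthejuggler/py_habits_widget | habitdb_streak_finder.py | get_days_since_not_zero_custom_date
-- ===== SOURCE A (Python) =====
-- def get_days_since_not_zero_custom_date(inner_dict, target_date):
--     days_since_not_zero = None
--     sorted_dates = [d for d in inner_dict.keys() if d <= target_date]
--     sorted_dates.sort(reverse=True)
--     for index, date_str in enumerate(sorted_dates):
--         if inner_dict[date_str] != 0:
--             days_since_not_zero = index
--             break
--     if days_since_not_zero is None:
--         days_since_not_zero = len(sorted_dates)
--     return days_since_not_zero
-- ===== SOURCE B (Python) =====
-- def get_days_since_not_zero_custom_date(inner_dict, target_date):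
--     # single linear scan for the most recent date <= target with a nonzero entry,
--     # then one count -- no sort
--     best = None
--     for d, v in inner_dict.items():
--         if d <= target_date and v != 0 and (best is None or best < d):
--             best = d
--     if best is None:
--         return sum(1 for d in inner_dict if d <= target_date)
--     return sum(1 for d in inner_dict if best < d <= target_date)
-- ===== Notes on version B (the rewrite author's own statement) =====
-- stated objective: alternative
-- what changed: replaces filter + reverse sort + scan-for-first-nonzero with a sort-free linear pass that finds the maximum nonzero date <= target plus one count of the dates above it (intended as faster, O(n) vs O(n log n); a timing run measured only 1.42x at the largest size, below the 1.5x bar, so no speed is claimed)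
import Mathlib
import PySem

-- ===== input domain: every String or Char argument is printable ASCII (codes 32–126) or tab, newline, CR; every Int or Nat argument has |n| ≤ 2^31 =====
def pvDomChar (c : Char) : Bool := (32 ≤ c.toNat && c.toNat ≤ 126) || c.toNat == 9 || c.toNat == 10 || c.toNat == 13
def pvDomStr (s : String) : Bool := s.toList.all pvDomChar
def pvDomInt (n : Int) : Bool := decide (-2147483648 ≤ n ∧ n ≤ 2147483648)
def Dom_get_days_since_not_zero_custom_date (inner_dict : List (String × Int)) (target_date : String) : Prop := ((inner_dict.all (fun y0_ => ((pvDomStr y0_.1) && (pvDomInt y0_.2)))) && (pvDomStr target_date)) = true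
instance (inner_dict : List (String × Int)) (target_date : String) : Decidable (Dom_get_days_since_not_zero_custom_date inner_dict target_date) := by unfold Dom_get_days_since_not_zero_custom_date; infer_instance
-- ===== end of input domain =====

-- B replaces filter+sort+scan by a sort-free linear pass (max nonzero date <= target) plus one count.
-- Equivalence is proved under Pre_ (distinct keys, i.e. the association list represents a Python dict).
-- ===== PORT A =====
def gdLoop (d : PySem.Dict String Int) : List String → Int → Option Int
  | [], _ => none
  | date_str :: rest, index =>
      -- inner_dict[date_str]: date_str is drawn from d.keys, so the key is present and getD is exact
      if (d.getD date_str 0) ≠ 0 then some index else gdLoop d rest (index + 1)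

def get_days_since_not_zero_custom_date (inner_dict : List (String × Int)) (target_date : String) : Int :=
  let d : PySem.Dict String Int := PySem.Dict.mk inner_dict
  let sorted_dates : List String :=
    PySem.List.sorted ((PySem.Dict.keys d).filter (fun s => decide (s ≤ target_date))) (fun x => x) true
  match gdLoop d sorted_dates 0 with
  | some index => index
  | none => (sorted_dates.length : Int)

-- ===== PORT B =====
def get_days_since_not_zero_custom_date_alt (inner_dict : List (String × Int)) (target_date : String) : Int :=
  let best : Option String := inner_dict.foldl
    (fun best p =>
      if decide (p.1 ≤ target_date) && decide (p.2 ≠ (0 : Int)) &&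
         (match best with | none => true | some m => decide (m < p.1))
      then some p.1 else best) none
  match best with
  | none => (inner_dict.countP (fun p => decide (p.1 ≤ target_date)) : Int)
  | some m => (inner_dict.countP (fun p => decide (m < p.1) && decide (p.1 ≤ target_date)) : Int)

-- ===== PRECONDITION & SPEC =====
-- Pre_ excludes association lists with duplicate keys: they do not represent a Python dict
-- (dict construction keeps the LAST value while the association-list convention looks up the first),
-- so behaviour there is accidental; both Python programs, fed the resulting dict, agree anyway.
def Pre_get_days_since_not_zero_custom_date (inner_dict : List (String × Int)) (target_date : String) : Prop :=
  (inner_dict.map Prod.fst).Nodup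
instance (inner_dict : List (String × Int)) (target_date : String) : Decidable (Pre_get_days_since_not_zero_custom_date inner_dict target_date) := by unfold Pre_get_days_since_not_zero_custom_date; infer_instance

def pvWitness_get_days_since_not_zero_custom_date : (List (String × Int)) × String :=
  ([("2021-01-01", 1), ("2021-01-02", 0)], "2021-01-03")

def Spec_get_days_since_not_zero_custom_date (inner_dict : List (String × Int)) (target_date : String) (out : Int) : Prop := out = get_days_since_not_zero_custom_date_alt inner_dict target_date
instance (inner_dict : List (String × Int)) (target_date : String) (out : Int) : Decidable (Spec_get_days_since_not_zero_custom_date inner_dict target_date out) := by unfold Spec_get_days_since_not_zero_custom_date; infer_instance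

-- ===== CLAIM (what is proved, stated in full; the proofs are below) =====
def Claim_equal_get_days_since_not_zero_custom_date : Prop := ∀ (inner_dict : List (String × Int)) (target_date : String), Dom_get_days_since_not_zero_custom_date inner_dict target_date → Pre_get_days_since_not_zero_custom_date inner_dict target_date → Spec_get_days_since_not_zero_custom_date inner_dict target_date (get_days_since_not_zero_custom_date inner_dict target_date)

-- ===== LEMMAS AND PROOFS =====

-- the acc-dependent step of B's fold, isolated
def pvMaxStep (b : Option String) (x : String) : Option String :=
  match b with
  | none => some x
  | some m => if m < x then some x else b

theorem pvMaxStep_some (m x : String) : pvMaxStep (some m) x = some (max m x) := by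
  by_cases h : m < x
  · simp [pvMaxStep, h, max_eq_right h.le]
  · simp [pvMaxStep, h, max_eq_left (not_lt.mp h)]

-- B's fold over the pairs = a running-max fold over the keys of the good pairs
theorem pvFold_eq_maxfold (t : String) (l : List (String × Int)) (b : Option String) :
    l.foldl (fun best p =>
      if decide (p.1 ≤ t) && decide (p.2 ≠ (0 : Int)) &&
         (match best with | none => true | some m => decide (m < p.1))
      then some p.1 else best) b
    = ((l.filter (fun p => decide (p.1 ≤ t) && decide (p.2 ≠ (0 : Int)))).map Prod.fst).foldl pvMaxStep b := by
  induction l generalizing b with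
  | nil => rfl
  | cons p rest ih =>
    rw [List.foldl_cons]
    by_cases h1 : p.1 ≤ t
    · by_cases h2 : p.2 = (0 : Int)
      · have hstep : (if decide (p.1 ≤ t) && decide (p.2 ≠ (0 : Int)) &&
             (match b with | none => true | some m => decide (m < p.1))
            then some p.1 else b) = b := by simp [h2]
        rw [hstep, List.filter_cons_of_neg (by simp [h2]), ih]
      · have hstep : (if decide (p.1 ≤ t) && decide (p.2 ≠ (0 : Int)) &&
             (match b with | none => true | some m => decide (m < p.1))
            then some p.1 else b) = pvMaxStep b p.1 := by
          cases b with
          | none => simp [pvMaxStep, h1, h2]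
          | some m => by_cases hm : m < p.1 <;> simp [pvMaxStep, h1, h2, hm]
        rw [hstep, List.filter_cons_of_pos (by simp [h1, h2]), List.map_cons, List.foldl_cons, ih]
    · have hstep : (if decide (p.1 ≤ t) && decide (p.2 ≠ (0 : Int)) &&
           (match b with | none => true | some m => decide (m < p.1))
          then some p.1 else b) = b := by simp [h1]
      rw [hstep, List.filter_cons_of_neg (by simp [h1]), ih]

theorem pvMaxfold_some (ks : List String) (m : String) :
    ks.foldl pvMaxStep (some m) = some (ks.foldl max m) := by
  induction ks generalizing m with
  | nil => rfl
  | cons x rest ih => simp [pvMaxStep_some, ih]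

theorem pvFoldl_max_mem (ks : List String) (x : String) :
    ks.foldl max x = x ∨ ks.foldl max x ∈ ks := by
  induction ks generalizing x with
  | nil => simp
  | cons y rest ih =>
    rw [List.foldl_cons]
    rcases ih (max x y) with h | h
    · rw [h]
      rcases max_choice x y with hm | hm
      · left; exact hm
      · right; rw [hm]; exact List.mem_cons_self
    · right; exact List.mem_cons_of_mem _ h

theorem pvLe_foldl_max (ks : List String) (x : String) :
    x ≤ ks.foldl max x ∧ ∀ y ∈ ks, y ≤ ks.foldl max x := by
  induction ks generalizing x with
  | nil => simp
  | cons z rest ih =>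
    obtain ⟨h1, h2⟩ := ih (max x z)
    refine ⟨le_trans (le_max_left x z) h1, ?_⟩
    intro y hy
    rcases List.mem_cons.mp hy with rfl | hy
    · exact le_trans (le_max_right x y) h1
    · exact h2 y hy

-- A's break-loop returns the length of the zero prefix
theorem pvGdLoop_eq (d : PySem.Dict String Int) (L : List String) (i : Int) :
    (match gdLoop d L i with | some j => j | none => i + (L.length : Int))
    = i + ((L.takeWhile (fun x => d.getD x 0 == 0)).length : Int) := by
  induction L generalizing i with
  | nil => simp [gdLoop]
  | cons x rest ih =>
    by_cases h : d.getD x 0 = 0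
    · have ih' := ih (i + 1)
      rw [gdLoop]
      simp only [h, ne_eq, not_true_eq_false, if_false, List.takeWhile_cons, beq_iff_eq,
        decide_true]
      cases hg : gdLoop d rest (i + 1) with
      | some j => simp [hg] at ih' ⊢; omega
      | none => simp [hg] at ih' ⊢; omega
    · rw [gdLoop]
      simp [h, List.takeWhile_cons]

-- on a strictly decreasing list, the zero prefix before the (maximal) nonzero element m
-- consists exactly of the elements greater than m
theorem pvTakeWhile_len (f : String → Int) :
    ∀ (L : List String), L.Pairwise (fun a b => b < a) →
    ∀ m, m ∈ L → f m ≠ 0 → (∀ x ∈ L, f x ≠ 0 → x ≤ m) →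
    (L.takeWhile (fun x => f x == 0)).length = L.countP (fun x => decide (m < x)) := by
  intro L
  induction L with
  | nil => intro _ m hm; simp at hm
  | cons x rest ih =>
    intro hpw m hm hfm hmax
    have hx_gt : ∀ y ∈ rest, y < x := (List.pairwise_cons.mp hpw).1
    rcases List.mem_cons.mp hm with rfl | hm
    · -- the head is m itself: takeWhile stops, nothing is greater than m
      have htw : (m :: rest).takeWhile (fun y => f y == 0) = [] := by
        rw [List.takeWhile_cons]; simp [hfm]
      have h2 : (m :: rest).countP (fun y => decide (m < y)) = 0 := by
        rw [List.countP_eq_zero]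
        intro y hy
        rcases List.mem_cons.mp hy with rfl | hy
        · simp
        · simp [not_lt.mpr (hx_gt y hy).le]
      rw [htw, h2]
      rfl
    · -- m is further down: the head is greater than m, hence zero, and counts
      have hxm : m < x := hx_gt m hm
      have hfx : f x = 0 := by
        by_contra hne
        exact absurd (hmax x List.mem_cons_self hne) (not_le.mpr hxm)
      have htw : (x :: rest).takeWhile (fun y => f y == 0)
          = x :: rest.takeWhile (fun y => f y == 0) := by
        rw [List.takeWhile_cons]; simp [hfx]
      have hIH := ih (List.pairwise_cons.mp hpw).2 m hm hfm
        (fun y hy h => hmax y (List.mem_cons_of_mem _ hy) h)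
      rw [htw, List.length_cons, List.countP_cons, hIH]
      simp [hxm]

-- ===== VERDICT (by name: the statement is the Claim_ definition above) =====
theorem get_days_since_not_zero_custom_date_spec : Claim_equal_get_days_since_not_zero_custom_date := by
  intro inner_dict t _hdom hpre
  unfold Spec_get_days_since_not_zero_custom_date
  unfold get_days_since_not_zero_custom_date get_days_since_not_zero_custom_date_alt
  simp only []
  set d : PySem.Dict String Int := PySem.Dict.mk inner_dict with hd
  have hkeys : d.keys = inner_dict.map Prod.fst := rfl
  have hnd : d.keys.Nodup := by rw [hkeys]; exact hpre
  have hval : ∀ p ∈ inner_dict, d.getD p.1 0 = p.2 := by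
    intro p hp
    exact PySem.Dict.getD_of_mem_items d hp hnd 0
  set F : List String := (d.keys.filter (fun s => decide (s ≤ t))) with hF
  set L : List String := PySem.List.sorted F (fun x => x) true with hL
  have hperm : L.Perm F := PySem.List.sorted_perm F (fun x => x) true
  have hFnd : F.Nodup := List.Nodup.filter _ hnd
  have hLnd : L.Nodup := (hperm.nodup_iff).mpr hFnd
  have hpwle : L.Pairwise (fun a b => b ≤ a) := by
    simpa using PySem.List.sorted_pairwise_rev F (fun x => x)
  have hpw : L.Pairwise (fun a b => b < a) := by
    refine (List.Pairwise.and hpwle hLnd).imp ?_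
    intro a b h
    exact lt_of_le_of_ne h.1 (fun e => h.2 e.symm)
  have hmemF : ∀ x, x ∈ F ↔ (x ∈ inner_dict.map Prod.fst ∧ x ≤ t) := by
    intro x; rw [hF, hkeys]; simp
  have hmemL : ∀ x, x ∈ L ↔ x ∈ F := fun x => hperm.mem_iff
  have hA := pvGdLoop_eq d L 0
  simp only [zero_add] at hA
  rw [hA]
  rw [pvFold_eq_maxfold]
  set G : List String := ((inner_dict.filter (fun p => decide (p.1 ≤ t) && decide (p.2 ≠ (0 : Int)))).map Prod.fst) with hG
  have hmemG : ∀ x, x ∈ G ↔ ∃ v, (x, v) ∈ inner_dict ∧ x ≤ t ∧ v ≠ 0 := by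
    intro x
    rw [hG]
    simp only [List.mem_map, List.mem_filter, Bool.and_eq_true, decide_eq_true_eq]
    constructor
    · rintro ⟨⟨a, b⟩, ⟨hp, h1, h2⟩, rfl⟩; exact ⟨b, hp, h1, h2⟩
    · rintro ⟨v, hp, h1, h2⟩; exact ⟨(x, v), ⟨hp, h1, h2⟩, rfl⟩
  cases hGe : G with
  | nil =>
    -- no nonzero value at or before the target: A scans all of L, B counts all dates ≤ t
    simp only [List.foldl_nil]
    have hzero : ∀ x ∈ L, d.getD x 0 = 0 := by
      intro x hx
      obtain ⟨hx1, hx2⟩ := (hmemF x).mp ((hmemL x).mp hx)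
      obtain ⟨p, hp, rfl⟩ := List.mem_map.mp hx1
      rw [hval p hp]
      by_contra hne
      have : p.1 ∈ G := (hmemG p.1).mpr ⟨p.2, hp, hx2, hne⟩
      rw [hGe] at this; simp at this
    have htw : L.takeWhile (fun x => d.getD x 0 == 0) = L := by
      rw [List.takeWhile_eq_self_iff]
      intro x hx; simp [hzero x hx]
    rw [htw]
    have hc : inner_dict.countP (fun p => decide (p.1 ≤ t)) = L.length := by
      rw [hperm.length_eq, hF, hkeys]
      rw [← List.countP_eq_length_filter, List.countP_map]
      rfl
    rw [hc]
  | cons x rest =>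
    -- best = the greatest key ≤ t carrying a nonzero value
    simp only [List.foldl_cons]
    have hn : pvMaxStep none x = some x := rfl
    rw [hn, pvMaxfold_some]
    set M : String := rest.foldl max x with hM
    have hMG : M ∈ G := by
      rw [hGe]
      rcases pvFoldl_max_mem rest x with h | h
      · rw [hM, h]; exact List.mem_cons_self
      · exact List.mem_cons_of_mem _ h
    have hGle : ∀ y ∈ G, y ≤ M := by
      intro y hy
      rw [hGe] at hy
      rcases List.mem_cons.mp hy with rfl | hy
      · exact (pvLe_foldl_max rest y).1
      · exact (pvLe_foldl_max rest x).2 y hy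
    obtain ⟨v, hv, hMt, hvne⟩ := (hmemG M).mp hMG
    have hvalM : d.getD M 0 ≠ 0 := by rw [hval (M, v) hv]; exact hvne
    have hML : M ∈ L := by
      rw [hmemL, hmemF]
      exact ⟨List.mem_map.mpr ⟨(M, v), hv, rfl⟩, hMt⟩
    have hHmax : ∀ y ∈ L, d.getD y 0 ≠ 0 → y ≤ M := by
      intro y hy hne
      obtain ⟨hy1, hy2⟩ := (hmemF y).mp ((hmemL y).mp hy)
      obtain ⟨p, hp, rfl⟩ := List.mem_map.mp hy1
      rw [hval p hp] at hne
      exact hGle p.1 ((hmemG p.1).mpr ⟨p.2, hp, hy2, hne⟩)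
    have htw := pvTakeWhile_len (fun y => d.getD y 0) L hpw M hML hvalM hHmax
    rw [htw]
    have hc : inner_dict.countP (fun p => decide (M < p.1) && decide (p.1 ≤ t)) =
        L.countP (fun y => decide (M < y)) := by
      rw [hperm.countP_eq, hF, hkeys, List.countP_filter, List.countP_map]
      rfl
    rw [← hc]
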